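-- pv_equiv track=rewrite | github.com/frpakin/aoc2021 | day19.py | day19_matchaxis
-- ===== SOURCE A (Python) =====
-- def day19_matchaxis(orig, beacon):
--     results = []
--     for i in range(len(orig)):
--         for j in range(len(beacon)):
--             c = beacon[j] - orig[i]
--             cpt = 0
--             for k in range(len(orig)):
--                 for l in range(len(beacon)):
--                     if c == beacon[l] - orig[k]:
--                         cpt += 1
--             if cpt > 11:
--                 results.append((c, cpt))
--     return results
-- ===== SOURCE B (Python) =====
-- def day19_matchaxis(orig, beacon):
--     cnt = {}
--     for o in orig:
--         for b in beacon:
--             d = b - o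
--             cnt[d] = cnt.get(d, 0) + 1
--     return [(b - o, cnt[b - o]) for o in orig for b in beacon if cnt[b - o] > 11]
-- ===== Notes on version B (the rewrite author's own statement) =====
-- stated objective: faster
-- what changed: B builds a dictionary counting every pairwise difference once, then decides each (i,j) pair with an O(1) lookup, replacing A's recount of all pairs for every pair (O(n^4) -> O(n^2)).
import Mathlib
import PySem

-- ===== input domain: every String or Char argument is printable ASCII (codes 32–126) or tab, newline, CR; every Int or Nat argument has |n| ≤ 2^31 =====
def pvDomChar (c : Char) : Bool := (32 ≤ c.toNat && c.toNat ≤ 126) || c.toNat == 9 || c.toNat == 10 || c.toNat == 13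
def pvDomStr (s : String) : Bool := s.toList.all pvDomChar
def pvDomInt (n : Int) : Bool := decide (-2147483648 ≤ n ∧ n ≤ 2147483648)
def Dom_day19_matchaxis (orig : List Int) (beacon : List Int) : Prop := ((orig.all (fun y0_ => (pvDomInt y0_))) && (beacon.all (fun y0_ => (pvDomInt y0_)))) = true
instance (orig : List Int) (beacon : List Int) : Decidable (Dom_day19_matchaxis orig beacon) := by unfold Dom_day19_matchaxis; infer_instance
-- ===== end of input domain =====

-- B replaces A's O(n^2 m^2) recount-per-pair with one pass that counts all pairwise
-- differences in a dictionary, then an O(1) lookup per pair (objective: faster).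

-- ===== PORT A =====
-- A's inner double loop counting pairs (k,l) with beacon[l] - orig[k] == c
def cptA (orig : List Int) (beacon : List Int) (c : Int) : Int :=
  orig.foldl (fun cpt o =>
    beacon.foldl (fun cpt b => if c == b - o then cpt + 1 else cpt) cpt) 0

def day19_matchaxis (orig : List Int) (beacon : List Int) : List (Int × Int) :=
  orig.foldl (fun results o =>
    beacon.foldl (fun results b =>
      let c := b - o
      let cpt := cptA orig beacon c
      if cpt > 11 then results ++ [(c, cpt)] else results) results) []

-- ===== PORT B =====
def day19_matchaxis_alt (orig : List Int) (beacon : List Int) : List (Int × Int) :=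
  let cnt : PySem.Dict Int Int :=
    orig.foldl (fun d o =>
      beacon.foldl (fun d b =>
        let k := b - o
        d.insert k (d.getD k 0 + 1)) d) PySem.Dict.empty
  orig.flatMap (fun o =>
    beacon.flatMap (fun b =>
      if cnt.getD (b - o) 0 > 11 then [(b - o, cnt.getD (b - o) 0)] else []))

-- ===== PRECONDITION & SPEC =====
def Spec_day19_matchaxis (orig : List Int) (beacon : List Int) (out : List (Int × Int)) : Prop := out = day19_matchaxis_alt orig beacon
instance (orig : List Int) (beacon : List Int) (out : List (Int × Int)) : Decidable (Spec_day19_matchaxis orig beacon out) := by unfold Spec_day19_matchaxis; infer_instance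

-- ===== CLAIM (what is proved, stated in full; the proofs are below) =====
def Claim_equal_day19_matchaxis : Prop := ∀ (orig : List Int) (beacon : List Int), Dom_day19_matchaxis orig beacon → Spec_day19_matchaxis orig beacon (day19_matchaxis orig beacon)

-- ===== LEMMAS AND PROOFS =====

-- the multiset of all pairwise differences beacon[l] - orig[k]
def pvDiffs (orig : List Int) (beacon : List Int) : List Int :=
  orig.flatMap (fun o => beacon.map (fun b => b - o))

theorem count_fold (c : Int) (l : List Int) (a : Int) :
    l.foldl (fun acc x => if c == x then acc + 1 else acc) a = a + l.count c := by
  induction l generalizing a with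
  | nil => simp
  | cons x xs ih =>
      simp only [List.foldl_cons, List.count_cons, ih]
      by_cases h : c = x
      · simp [h]; ring
      · have h' : x ≠ c := fun e => h e.symm
        simp [h, h']

theorem cptA_eq (orig beacon : List Int) (c : Int) :
    cptA orig beacon c = ((pvDiffs orig beacon).count c : Int) := by
  have : (pvDiffs orig beacon).foldl
      (fun acc x => if c == x then acc + 1 else acc) 0 = cptA orig beacon c := by
    simp [pvDiffs, List.foldl_flatMap, List.foldl_map, cptA]
  rw [← this, count_fold]
  simp

theorem cnt_eq (orig beacon : List Int) :
    (orig.foldl (fun d o =>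
      beacon.foldl (fun d b =>
        let k := b - o
        d.insert k (d.getD k 0 + 1)) d) PySem.Dict.empty) =
    PySem.Dict.counter (pvDiffs orig beacon) := by
  rw [← PySem.Dict.foldl_insert_getD_add_one_eq_counter]
  simp [pvDiffs, List.foldl_flatMap, List.foldl_map]

theorem flatMap_if {α β : Type} (l : List α) (p : α → Prop) [DecidablePred p] (f : α → β) :
    l.flatMap (fun x => if p x then [f x] else []) =
    (l.filter (fun x => decide (p x))).map f := by
  induction l with
  | nil => simp
  | cons x xs ih =>
      by_cases h : p x <;> simp [h, ih]

-- ===== VERDICT (by name: the statement is the Claim_ definition above) =====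
theorem day19_matchaxis_spec : Claim_equal_day19_matchaxis := by
  intro orig beacon _
  unfold Spec_day19_matchaxis day19_matchaxis day19_matchaxis_alt
  simp only [cnt_eq, PySem.Dict.getD_counter, ← cptA_eq]
  have hA : orig.foldl (fun results o =>
      beacon.foldl (fun results b =>
        let c := b - o
        let cpt := cptA orig beacon c
        if cpt > 11 then results ++ [(c, cpt)] else results) results) [] =
      orig.flatMap (fun o =>
        (beacon.filter (fun b => decide (cptA orig beacon (b - o) > 11))).map
          (fun b => (b - o, cptA orig beacon (b - o)))) := by
    have houter := PySem.List.foldl_append_eq_flatMap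
      (l := orig)
      (g := fun o => (beacon.filter (fun b => decide (cptA orig beacon (b - o) > 11))).map
          (fun b => (b - o, cptA orig beacon (b - o))))
      (acc := ([] : List (Int × Int)))
    have hcong : orig.foldl (fun results o =>
        beacon.foldl (fun results b =>
          let c := b - o
          let cpt := cptA orig beacon c
          if cpt > 11 then results ++ [(c, cpt)] else results) results) [] =
        orig.foldl (fun acc o =>
          acc ++ (beacon.filter (fun b => decide (cptA orig beacon (b - o) > 11))).map
            (fun b => (b - o, cptA orig beacon (b - o)))) [] := by
      apply PySem.List.foldl_congr_mem
      intro acc o _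
      exact PySem.List.foldl_append_ite
        (l := beacon) (p := fun b => cptA orig beacon (b - o) > 11)
        (f := fun b => (b - o, cptA orig beacon (b - o))) (acc := acc)
    rw [hcong, houter, List.nil_append]
  rw [hA]
  congr 1
  funext o
  rw [flatMap_if]
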